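-- pv_equiv track=rewrite | github.com/AIArmstrong/Armstrong-Artificial-Intelligence | ingestion/r1_reasoning/jina_research_ingester.py | _determine_source_type
-- ===== SOURCE A (Python) =====
-- def _determine_source_type(source_name: str, url: str, content: str) -> str:
--     """Determine the type of source"""
--
--     content_lower = content.lower()
--
--     # Academic sources
--     if (source_name in ["arxiv", "scholar"] or
--         "arxiv.org" in url or
--         any(indicator in content_lower for indicator in ["abstract", "methodology", "references"])):
--         return "academic"
--
--     # Documentation
--     if (source_name == "documentation" or
--         "docs." in url or
--         "documentation" in url or
--         any(indicator in content_lower for indicator in ["api", "tutorial", "guide"])):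
--         return "documentation"
--
--     # News
--     if (source_name == "news" or
--         any(domain in url for domain in ["news", "reuters", "techcrunch", "wired"]) or
--         any(indicator in content_lower for indicator in ["breaking", "reported", "according to"])):
--         return "news"
--
--     # Blog
--     if (any(indicator in content_lower for indicator in ["posted by", "blog", "opinion"]) or
--         "blog" in url):
--         return "blog"
--
--     # Default
--     return "web"
-- ===== SOURCE B (Python) =====
-- def _determine_source_type(source_name: str, url: str, content: str) -> str:
--     """Determine the type of source: minimum-priority match over a flat pattern list."""
--     content_lower = content.lower()
--     PATTERNS = [
--         (0, 'name', "arxiv"), (0, 'name', "scholar"), (0, 'url', "arxiv.org"),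
--         (0, 'text', "abstract"), (0, 'text', "methodology"), (0, 'text', "references"),
--         (1, 'name', "documentation"), (1, 'url', "docs."), (1, 'url', "documentation"),
--         (1, 'text', "api"), (1, 'text', "tutorial"), (1, 'text', "guide"),
--         (2, 'name', "news"), (2, 'url', "news"), (2, 'url', "reuters"),
--         (2, 'url', "techcrunch"), (2, 'url', "wired"),
--         (2, 'text', "breaking"), (2, 'text', "reported"), (2, 'text', "according to"),
--         (3, 'text', "posted by"), (3, 'text', "blog"), (3, 'text', "opinion"), (3, 'url', "blog"),
--     ]
--     LABELS = ["academic", "documentation", "news", "blog"]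
--     best = 4
--     for prio, kind, needle in PATTERNS:
--         if prio < best:
--             if kind == 'name':
--                 hit = source_name == needle
--             elif kind == 'url':
--                 hit = needle in url
--             else:
--                 hit = needle in content_lower
--             if hit:
--                 best = prio
--     return LABELS[best] if best < 4 else "web"
-- ===== Notes on version B (the rewrite author's own statement) =====
-- stated objective: alternative
-- what changed: Replaces A's early-return chain of four if-blocks by a min-accumulator scan over one flat list of (priority, field, needle) patterns: every pattern is a single atomic test, the loop keeps the minimum priority of any hit, and the label is looked up from the resulting index at the end.
import Mathlib
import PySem

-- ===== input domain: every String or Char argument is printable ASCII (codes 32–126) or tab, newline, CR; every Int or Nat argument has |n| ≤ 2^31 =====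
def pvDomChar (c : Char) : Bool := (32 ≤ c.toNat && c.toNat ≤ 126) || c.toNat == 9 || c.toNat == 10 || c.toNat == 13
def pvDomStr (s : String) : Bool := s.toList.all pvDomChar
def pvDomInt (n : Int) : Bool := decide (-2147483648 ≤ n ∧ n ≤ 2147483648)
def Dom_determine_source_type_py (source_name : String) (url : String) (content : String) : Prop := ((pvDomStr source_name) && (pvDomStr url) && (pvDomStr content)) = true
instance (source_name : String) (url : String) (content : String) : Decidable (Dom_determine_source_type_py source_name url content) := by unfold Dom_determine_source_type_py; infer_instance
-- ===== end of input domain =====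

-- B replaces A's early-return if-chain by a min-priority scan over one flat pattern list (objective: alternative).

-- ===== PORT A =====
def determine_source_type_py (source_name : String) (url : String) (content : String) : String :=
  let content_lower := PySem.Str.lower content
  if (["arxiv", "scholar"].contains source_name ||
      PySem.Str.isIn "arxiv.org" url ||
      (["abstract", "methodology", "references"].any (fun indicator => PySem.Str.isIn indicator content_lower))) then
    "academic"
  else if (source_name == "documentation" ||
      PySem.Str.isIn "docs." url ||
      PySem.Str.isIn "documentation" url ||
      (["api", "tutorial", "guide"].any (fun indicator => PySem.Str.isIn indicator content_lower))) then
    "documentation"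
  else if (source_name == "news" ||
      (["news", "reuters", "techcrunch", "wired"].any (fun domain => PySem.Str.isIn domain url)) ||
      (["breaking", "reported", "according to"].any (fun indicator => PySem.Str.isIn indicator content_lower))) then
    "news"
  else if ((["posted by", "blog", "opinion"].any (fun indicator => PySem.Str.isIn indicator content_lower)) ||
      PySem.Str.isIn "blog" url) then
    "blog"
  else
    "web"

-- ===== PORT B =====
-- the pattern fields of Source B: 'name' / 'url' / 'text'
inductive DstPat
  | name : String → DstPat
  | url  : String → DstPat
  | text : String → DstPat
deriving DecidableEq, Repr

-- Source B's per-pattern hit test (the inner if/elif/else)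
def dstHit (source_name : String) (url : String) (content_lower : String) : DstPat → Bool
  | .name s => source_name == s
  | .url s  => PySem.Str.isIn s url
  | .text s => PySem.Str.isIn s content_lower

-- Source B's PATTERNS list
def dstPatterns : List (Nat × DstPat) :=
  [(0, .name "arxiv"), (0, .name "scholar"), (0, .url "arxiv.org"),
   (0, .text "abstract"), (0, .text "methodology"), (0, .text "references"),
   (1, .name "documentation"), (1, .url "docs."), (1, .url "documentation"),
   (1, .text "api"), (1, .text "tutorial"), (1, .text "guide"),
   (2, .name "news"), (2, .url "news"), (2, .url "reuters"),
   (2, .url "techcrunch"), (2, .url "wired"),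
   (2, .text "breaking"), (2, .text "reported"), (2, .text "according to"),
   (3, .text "posted by"), (3, .text "blog"), (3, .text "opinion"), (3, .url "blog")]

-- Source B's 'for prio, kind, needle in PATTERNS' loop with the min accumulator 'best'
def dstLoop (source_name : String) (url : String) (content_lower : String) :
    List (Nat × DstPat) → Nat → Nat
  | [], best => best
  | (prio, pat) :: tl, best =>
    if prio < best then
      if dstHit source_name url content_lower pat then
        dstLoop source_name url content_lower tl prio
      else
        dstLoop source_name url content_lower tl best
    else
      dstLoop source_name url content_lower tl best

def dstLabels : List String := ["academic", "documentation", "news", "blog"]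

def determine_source_type_py_alt (source_name : String) (url : String) (content : String) : String :=
  let content_lower := PySem.Str.lower content
  let best := dstLoop source_name url content_lower dstPatterns 4
  -- 'LABELS[best] if best < 4 else "web"' (the index is in range when best < 4)
  if best < 4 then dstLabels.getD best "web" else "web"

-- ===== PRECONDITION & SPEC =====
def Spec_determine_source_type_py (source_name : String) (url : String) (content : String) (out : String) : Prop := out = determine_source_type_py_alt source_name url content
instance (source_name : String) (url : String) (content : String) (out : String) : Decidable (Spec_determine_source_type_py source_name url content out) := by unfold Spec_determine_source_type_py; infer_instance

-- ===== CLAIM (what is proved, stated in full; the proofs are below) =====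
def Claim_equal_determine_source_type_py : Prop := ∀ (source_name : String) (url : String) (content : String), Dom_determine_source_type_py source_name url content → Spec_determine_source_type_py source_name url content (determine_source_type_py source_name url content)

-- ===== LEMMAS AND PROOFS =====

-- dstLoop is the left fold that takes the minimum priority over all hitting patterns
theorem dstLoop_eq_fold (sn u cl : String) (ps : List (Nat × DstPat)) (best : Nat) :
    dstLoop sn u cl ps best =
      ps.foldl (fun acc q => if dstHit sn u cl q.2 then min acc q.1 else acc) best := by
  induction ps generalizing best with
  | nil => rfl
  | cons q tl ih =>
    obtain ⟨p, pat⟩ := q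
    simp only [dstLoop, List.foldl]
    by_cases hp : p < best
    · have h1 : min best p = p := by omega
      by_cases hh : dstHit sn u cl pat <;> simp [hp, hh, ih, h1]
    · have h1 : min best p = best := by omega
      by_cases hh : dstHit sn u cl pat <;> simp [hp, hh, ih, h1]

-- folding a block of patterns that all carry the same priority p
theorem fold_block (sn u cl : String) (p : Nat) (pats : List DstPat)
    (rest : List (Nat × DstPat)) (acc : Nat) :
    List.foldl (fun acc q => if dstHit sn u cl q.2 then min acc q.1 else acc) acc
        ((pats.map (fun x => (p, x))) ++ rest) =
      List.foldl (fun acc q => if dstHit sn u cl q.2 then min acc q.1 else acc)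
        (if pats.any (dstHit sn u cl) then min acc p else acc) rest := by
  induction pats generalizing acc with
  | nil => simp
  | cons x tl ih =>
    simp only [List.map, List.cons_append, List.foldl, List.any_cons]
    by_cases hh : dstHit sn u cl x
    · simp [hh, ih]
    · simp [hh, ih]

theorem determine_source_type_py_spec_aux (sn u cl : String) :
    (let best := dstLoop sn u cl dstPatterns 4;
     if best < 4 then dstLabels.getD best "web" else "web") =
    (if (["arxiv", "scholar"].contains sn ||
        PySem.Str.isIn "arxiv.org" u ||
        (["abstract", "methodology", "references"].any (fun i => PySem.Str.isIn i cl))) then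
      "academic"
    else if (sn == "documentation" ||
        PySem.Str.isIn "docs." u ||
        PySem.Str.isIn "documentation" u ||
        (["api", "tutorial", "guide"].any (fun i => PySem.Str.isIn i cl))) then
      "documentation"
    else if (sn == "news" ||
        (["news", "reuters", "techcrunch", "wired"].any (fun d => PySem.Str.isIn d u)) ||
        (["breaking", "reported", "according to"].any (fun i => PySem.Str.isIn i cl))) then
      "news"
    else if ((["posted by", "blog", "opinion"].any (fun i => PySem.Str.isIn i cl)) ||
        PySem.Str.isIn "blog" u) then
      "blog"
    else
      "web") := by
  have hsplit : dstPatterns =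
      ([DstPat.name "arxiv", .name "scholar", .url "arxiv.org",
        .text "abstract", .text "methodology", .text "references"].map (fun x => (0, x))) ++
      (([DstPat.name "documentation", .url "docs.", .url "documentation",
        .text "api", .text "tutorial", .text "guide"].map (fun x => (1, x))) ++
      (([DstPat.name "news", .url "news", .url "reuters", .url "techcrunch", .url "wired",
        .text "breaking", .text "reported", .text "according to"].map (fun x => (2, x))) ++
      (([DstPat.text "posted by", .text "blog", .text "opinion", .url "blog"].map (fun x => (3, x))) ++ ([] : List (Nat × DstPat))))) := rfl
  simp only [dstLoop_eq_fold, hsplit, fold_block, List.foldl_nil]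
  cases h0 : ([DstPat.name "arxiv", .name "scholar", .url "arxiv.org",
        .text "abstract", .text "methodology", .text "references"].any (dstHit sn u cl)) <;>
  cases h1 : ([DstPat.name "documentation", .url "docs.", .url "documentation",
        .text "api", .text "tutorial", .text "guide"].any (dstHit sn u cl)) <;>
  cases h2 : ([DstPat.name "news", .url "news", .url "reuters", .url "techcrunch", .url "wired",
        .text "breaking", .text "reported", .text "according to"].any (dstHit sn u cl)) <;>
  cases h3 : ([DstPat.text "posted by", .text "blog", .text "opinion", .url "blog"].any (dstHit sn u cl)) <;>
  simp_all [dstHit, dstLabels, Bool.or_assoc]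

-- ===== VERDICT (by name: the statement is the Claim_ definition above) =====
theorem determine_source_type_py_spec : Claim_equal_determine_source_type_py := by
  intro sn u content _
  unfold Spec_determine_source_type_py determine_source_type_py determine_source_type_py_alt
  exact (determine_source_type_py_spec_aux sn u (PySem.Str.lower content)).symm
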